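-- pv_equiv track=rewrite | github.com/h1r9do/Network-Dashboard | remove_tst01_duplicate_final.py | find_duplicate_rules
-- ===== SOURCE A (Python) =====
-- def normalize_rule_for_comparison(rule):
--     """Normalize rule values for comparison (handle case sensitivity)"""
--     normalized = rule.copy()
--
--     # Normalize protocol field - both "any" and "Any" are equivalent
--     if normalized.get('protocol', '').lower() == 'any':
--         normalized['protocol'] = 'any'
--
--     # Normalize other fields that might have case variations
--     for field in ['policy', 'srcPort', 'srcCidr', 'destPort', 'destCidr']:
--         if field in normalized and normalized[field]:
--             if normalized[field].lower() == 'any':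
--                 normalized[field] = 'Any'
--
--     return normalized
--
-- def find_duplicate_rules(rules):
--     """Find duplicate rules considering case-insensitive comparison"""
--     duplicates = []
--
--     for i, rule1 in enumerate(rules):
--         for j, rule2 in enumerate(rules[i+1:], i+1):
--             norm1 = normalize_rule_for_comparison(rule1)
--             norm2 = normalize_rule_for_comparison(rule2)
--
--             # Compare all relevant fields
--             if (norm1.get('policy') == norm2.get('policy') and
--                 norm1.get('protocol') == norm2.get('protocol') and
--                 norm1.get('srcPort') == norm2.get('srcPort') and
--                 norm1.get('srcCidr') == norm2.get('srcCidr') and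
--                 norm1.get('destPort') == norm2.get('destPort') and
--                 norm1.get('destCidr') == norm2.get('destCidr') and
--                 norm1.get('comment') == norm2.get('comment')):
--
--                 duplicates.append((i, j))
--
--     return duplicates
-- ===== SOURCE B (Python) =====
-- def find_duplicate_rules(rules):
--     """Find duplicate rules via one-pass hash grouping on a normalized 7-field key"""
--     def rule_key(rule):
--         proto = rule.get('protocol')
--         if rule.get('protocol', '').lower() == 'any':
--             proto = 'any'
--         def norm(field):
--             v = rule.get(field)
--             if v and v.lower() == 'any':
--                 return 'Any'
--             return v
--         return (norm('policy'), proto, norm('srcPort'), norm('srcCidr'),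
--                 norm('destPort'), norm('destCidr'), rule.get('comment'))
--
--     keys = [rule_key(r) for r in rules]
--     groups = {}
--     for i, k in enumerate(keys):
--         groups.setdefault(k, []).append(i)
--     out = []
--     for i, k in enumerate(keys):
--         out.extend((i, j) for j in groups[k] if i < j)
--     return out
-- ===== Notes on version B (the rewrite author's own statement) =====
-- stated objective: faster
-- what changed: Replaces the O(n^2)-pairwise comparison (which re-normalizes both rules for every pair) with a single normalization pass that computes a 7-field key per rule, hash-groups indices by key, and emits each rule's same-key later indices from its group.
import Mathlib
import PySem

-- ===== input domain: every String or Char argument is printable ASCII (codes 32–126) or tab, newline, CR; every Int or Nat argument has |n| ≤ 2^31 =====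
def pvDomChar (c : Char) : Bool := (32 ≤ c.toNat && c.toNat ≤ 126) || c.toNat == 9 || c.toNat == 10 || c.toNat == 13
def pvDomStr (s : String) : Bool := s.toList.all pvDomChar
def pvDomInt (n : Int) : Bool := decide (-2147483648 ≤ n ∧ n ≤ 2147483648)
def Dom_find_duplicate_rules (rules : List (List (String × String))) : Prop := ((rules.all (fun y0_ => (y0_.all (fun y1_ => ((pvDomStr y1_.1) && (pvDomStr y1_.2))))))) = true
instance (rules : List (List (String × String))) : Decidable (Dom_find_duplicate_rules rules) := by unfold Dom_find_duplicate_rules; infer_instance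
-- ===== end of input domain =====

-- B replaces A's O(n^2) pairwise comparison (which re-normalizes both rules for every pair)
-- by one normalization pass into a 7-field key per rule plus hash-grouping of indices by key.

-- ===== PORT A =====

-- one iteration of A's `for field in [...]` normalization loop
def stepA (d : PySem.Dict String String) (f : String) : PySem.Dict String String :=
  match d.get? f with
  | some v => if (v != "") && (PySem.Str.lower v == "any") then d.insert f "Any" else d
  | none => d

-- port of normalize_rule_for_comparison
def normalizeA (r : List (String × String)) : PySem.Dict String String :=
  let d0 := PySem.Dict.mk r
  let d1 := if PySem.Str.lower (d0.getD "protocol" "") == "any" then d0.insert "protocol" "any" else d0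
  List.foldl stepA d1 ["policy", "srcPort", "srcCidr", "destPort", "destCidr"]

-- A's 7-field comparison of the two normalized rules
def condA (r1 r2 : List (String × String)) : Bool :=
  let n1 := normalizeA r1
  let n2 := normalizeA r2
  (n1.get? "policy" == n2.get? "policy") &&
  (n1.get? "protocol" == n2.get? "protocol") &&
  (n1.get? "srcPort" == n2.get? "srcPort") &&
  (n1.get? "srcCidr" == n2.get? "srcCidr") &&
  (n1.get? "destPort" == n2.get? "destPort") &&
  (n1.get? "destCidr" == n2.get? "destCidr") &&
  (n1.get? "comment" == n2.get? "comment")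

def find_duplicate_rules (rules : List (List (String × String))) : List (Int × Int) :=
  (PySem.List.enumerate rules).foldl (fun dups p =>
    (PySem.List.enumerate (PySem.List.slice rules (some (p.1 + 1))) (p.1 + 1)).foldl
      (fun dups q => if condA p.2 q.2 then dups ++ [(p.1, q.1)] else dups) dups) []

-- ===== PORT B =====

-- Source B's norm(field)
def normField (r : List (String × String)) (f : String) : Option String :=
  match (PySem.Dict.mk r).get? f with
  | some v => if (v != "") && (PySem.Str.lower v == "any") then some "Any" else some v
  | none => none

-- Source B's rule_key: the 7 normalized fields as a tuple
def ruleKey (r : List (String × String)) :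
    Option String × Option String × Option String × Option String ×
    Option String × Option String × Option String :=
  let d := PySem.Dict.mk r
  let proto := if PySem.Str.lower (d.getD "protocol" "") == "any" then some "any" else d.get? "protocol"
  (normField r "policy", proto, normField r "srcPort", normField r "srcCidr",
   normField r "destPort", normField r "destCidr", d.get? "comment")

def find_duplicate_rules_alt (rules : List (List (String × String))) : List (Int × Int) :=
  let keys := rules.map ruleKey
  let groups := (PySem.List.enumerate keys).foldl
      (fun d p => d.modify p.2 [] (fun l => l ++ [p.1])) PySem.Dict.empty
  (PySem.List.enumerate keys).foldl
    (fun out p => out ++ ((groups.getD p.2 []).filter (fun j => p.1 < j)).map (fun j => (p.1, j))) []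

-- ===== PRECONDITION & SPEC =====
def Spec_find_duplicate_rules (rules : List (List (String × String))) (out : List (Int × Int)) : Prop := out = find_duplicate_rules_alt rules
instance (rules : List (List (String × String))) (out : List (Int × Int)) : Decidable (Spec_find_duplicate_rules rules out) := by unfold Spec_find_duplicate_rules; infer_instance

-- ===== CLAIM (what is proved, stated in full; the proofs are below) =====
def Claim_equal_find_duplicate_rules : Prop := ∀ (rules : List (List (String × String))), Dom_find_duplicate_rules rules → Spec_find_duplicate_rules rules (find_duplicate_rules rules)

-- ===== LEMMAS AND PROOFS =====

-- get? through one stepA at a different field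
lemma stepA_get?_ne (d : PySem.Dict String String) (f g : String) (h : g ≠ f) :
    (stepA d f).get? g = d.get? g := by
  unfold stepA
  split
  · split
    · rw [PySem.Dict.get?_insert_of_ne _ _ h]
    · rfl
  · rfl

-- get? through one stepA at its own field
lemma stepA_get?_self (d : PySem.Dict String String) (f : String) :
    (stepA d f).get? f =
      match d.get? f with
      | some v => if (v != "") && (PySem.Str.lower v == "any") then some "Any" else some v
      | none => none := by
  unfold stepA
  split
  · rename_i v heq
    split
    · rw [PySem.Dict.get?_insert_self]
    · exact heq
  · rename_i heq
    exact heq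

-- get? through A's protocol adjustment at a different field
lemma protoStep_get?_ne (d : PySem.Dict String String) (g : String) (h : g ≠ "protocol") :
    (if PySem.Str.lower (d.getD "protocol" "") == "any" then d.insert "protocol" "any" else d).get? g
      = d.get? g := by
  split
  · rw [PySem.Dict.get?_insert_of_ne _ _ h]
  · rfl

lemma normA_get?_policy (r : List (String × String)) :
    (normalizeA r).get? "policy" = normField r "policy" := by
  unfold normalizeA
  simp only [List.foldl]
  rw [stepA_get?_ne _ _ _ (by decide), stepA_get?_ne _ _ _ (by decide),
      stepA_get?_ne _ _ _ (by decide), stepA_get?_ne _ _ _ (by decide),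
      stepA_get?_self, protoStep_get?_ne _ _ (by decide)]
  rfl

lemma normA_get?_srcPort (r : List (String × String)) :
    (normalizeA r).get? "srcPort" = normField r "srcPort" := by
  unfold normalizeA
  simp only [List.foldl]
  rw [stepA_get?_ne _ _ _ (by decide), stepA_get?_ne _ _ _ (by decide),
      stepA_get?_ne _ _ _ (by decide), stepA_get?_self,
      stepA_get?_ne _ _ _ (by decide), protoStep_get?_ne _ _ (by decide)]
  rfl

lemma normA_get?_srcCidr (r : List (String × String)) :
    (normalizeA r).get? "srcCidr" = normField r "srcCidr" := by
  unfold normalizeA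
  simp only [List.foldl]
  rw [stepA_get?_ne _ _ _ (by decide), stepA_get?_ne _ _ _ (by decide),
      stepA_get?_self, stepA_get?_ne _ _ _ (by decide),
      stepA_get?_ne _ _ _ (by decide), protoStep_get?_ne _ _ (by decide)]
  rfl

lemma normA_get?_destPort (r : List (String × String)) :
    (normalizeA r).get? "destPort" = normField r "destPort" := by
  unfold normalizeA
  simp only [List.foldl]
  rw [stepA_get?_ne _ _ _ (by decide), stepA_get?_self,
      stepA_get?_ne _ _ _ (by decide), stepA_get?_ne _ _ _ (by decide),
      stepA_get?_ne _ _ _ (by decide), protoStep_get?_ne _ _ (by decide)]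
  rfl

lemma normA_get?_destCidr (r : List (String × String)) :
    (normalizeA r).get? "destCidr" = normField r "destCidr" := by
  unfold normalizeA
  simp only [List.foldl]
  rw [stepA_get?_self, stepA_get?_ne _ _ _ (by decide),
      stepA_get?_ne _ _ _ (by decide), stepA_get?_ne _ _ _ (by decide),
      stepA_get?_ne _ _ _ (by decide), protoStep_get?_ne _ _ (by decide)]
  rfl

lemma normA_get?_protocol (r : List (String × String)) :
    (normalizeA r).get? "protocol" =
      (if PySem.Str.lower ((PySem.Dict.mk r).getD "protocol" "") == "any" then some "any"
       else (PySem.Dict.mk r).get? "protocol") := by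
  unfold normalizeA
  simp only [List.foldl]
  rw [stepA_get?_ne _ _ _ (by decide), stepA_get?_ne _ _ _ (by decide),
      stepA_get?_ne _ _ _ (by decide), stepA_get?_ne _ _ _ (by decide),
      stepA_get?_ne _ _ _ (by decide)]
  split
  · rw [PySem.Dict.get?_insert_self]
  · rfl

lemma normA_get?_comment (r : List (String × String)) :
    (normalizeA r).get? "comment" = (PySem.Dict.mk r).get? "comment" := by
  unfold normalizeA
  simp only [List.foldl]
  rw [stepA_get?_ne _ _ _ (by decide), stepA_get?_ne _ _ _ (by decide),
      stepA_get?_ne _ _ _ (by decide), stepA_get?_ne _ _ _ (by decide),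
      stepA_get?_ne _ _ _ (by decide), protoStep_get?_ne _ _ (by decide)]

-- A's 7-field comparison IS equality of B's keys
lemma condA_iff (r1 r2 : List (String × String)) :
    condA r1 r2 = true ↔ ruleKey r1 = ruleKey r2 := by
  simp only [condA, ruleKey, Bool.and_eq_true, beq_iff_eq,
    normA_get?_policy, normA_get?_protocol, normA_get?_srcPort, normA_get?_srcCidr,
    normA_get?_destPort, normA_get?_destCidr, normA_get?_comment, Prod.mk.injEq]
  tauto

lemma condA_eq (r1 r2 : List (String × String)) :
    condA r1 r2 = (ruleKey r1 == ruleKey r2) := by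
  rw [Bool.eq_iff_iff]
  simp only [condA_iff, beq_iff_eq]

-- ===== generic enumerate facts =====

lemma enum_nil {α : Type} (s : Int) : PySem.List.enumerate ([] : List α) s = [] := by
  simp [PySem.List.enumerate]

lemma enum_cons {α : Type} (x : α) (t : List α) (s : Int) :
    PySem.List.enumerate (x :: t) s = (s, x) :: PySem.List.enumerate t (s + 1) := by
  simp [PySem.List.enumerate]

lemma enum_map {α β : Type} (f : α → β) (xs : List α) (s : Int) :
    PySem.List.enumerate (xs.map f) s = (PySem.List.enumerate xs s).map (fun p => (p.1, f p.2)) := by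
  induction xs generalizing s with
  | nil => rw [List.map_nil, enum_nil, enum_nil, List.map_nil]
  | cons x t ih => rw [List.map_cons, enum_cons, enum_cons, List.map_cons, ih]

lemma enum_fst_ge {α : Type} (xs : List α) (s : Int) :
    ∀ p ∈ PySem.List.enumerate xs s, s ≤ p.1 := by
  intro p hp
  obtain ⟨k, hk, rfl⟩ := (PySem.List.mem_enumerate_iff xs s p).1 hp
  simp

-- the suffix enumeration is the ≥-filtered full enumeration
lemma filter_enum_eq_enum_drop {α : Type} (xs : List α) (s : Int) (k : Nat) :
    (PySem.List.enumerate xs s).filter (fun q => decide (s + k ≤ q.1))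
      = PySem.List.enumerate (xs.drop k) (s + k) := by
  induction xs generalizing s k with
  | nil => rw [enum_nil, List.drop_nil, enum_nil, List.filter_nil]
  | cons x t ih =>
    cases k with
    | zero =>
      simp only [Nat.cast_zero, add_zero, List.drop_zero]
      rw [List.filter_eq_self.2]
      intro q hq
      rw [enum_cons, List.mem_cons] at hq
      rcases hq with hq | hq
      · simp [hq]
      · have := enum_fst_ge t (s + 1) q hq
        simp only [decide_eq_true_eq]
        omega
    | succ m =>
      rw [enum_cons, List.drop_succ_cons, List.filter_cons]
      have hhead : (decide (s + ((m + 1 : Nat) : Int) ≤ s)) = false := by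
        simp only [decide_eq_false_iff_not]
        push_cast
        omega
      rw [hhead]
      simp only [Bool.false_eq_true, if_false]
      have hpred : (fun q : Int × α => decide (s + ((m + 1 : Nat) : Int) ≤ q.1))
          = (fun q : Int × α => decide ((s + 1) + ((m : Nat) : Int) ≤ q.1)) := by
        funext q
        simp only [decide_eq_decide]
        push_cast
        omega
      rw [hpred, ih (s + 1) m]
      have : (s + 1) + ((m : Nat) : Int) = s + ((m + 1 : Nat) : Int) := by push_cast; ring
      rw [this]

-- canonical description: all (i, j) with i < j and equal keys, grouped by i
def canon (keys : List (Option String × Option String × Option String × Option String ×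
    Option String × Option String × Option String)) : List (Int × Int) :=
  (PySem.List.enumerate keys).flatMap (fun p =>
    ((PySem.List.enumerate keys).filter (fun q => decide (p.1 < q.1) && (q.2 == p.2))).map
      (fun q => (p.1, q.1)))

-- A as a flatMap of filtered suffix enumerations
lemma A_flat (rules : List (List (String × String))) :
    find_duplicate_rules rules = (PySem.List.enumerate rules).flatMap (fun p =>
      ((PySem.List.enumerate (PySem.List.slice rules (some (p.1 + 1))) (p.1 + 1)).filter
        (fun q => condA p.2 q.2)).map (fun q => (p.1, q.1))) := by
  unfold find_duplicate_rules
  have h := PySem.List.foldl_congr_mem (PySem.List.enumerate rules)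
      (f := fun dups p =>
        (PySem.List.enumerate (PySem.List.slice rules (some (p.1 + 1))) (p.1 + 1)).foldl
          (fun dups q => if condA p.2 q.2 then dups ++ [(p.1, q.1)] else dups) dups)
      (g := fun dups p => dups ++
        ((PySem.List.enumerate (PySem.List.slice rules (some (p.1 + 1))) (p.1 + 1)).filter
          (fun q => condA p.2 q.2)).map (fun q => (p.1, q.1)))
      []
      (fun acc x _ => PySem.List.foldl_append_if _ _ _ _)
  rw [h, PySem.List.foldl_append_eq_flatMap, List.nil_append]

lemma A_eq_canon (rules : List (List (String × String))) :
    find_duplicate_rules rules = canon (rules.map ruleKey) := by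
  rw [A_flat]
  unfold canon
  rw [enum_map, List.flatMap_map]
  apply List.flatMap_congr
  intro p hp
  obtain ⟨m, hm, rfl⟩ := (PySem.List.mem_enumerate_iff _ _ _).1 hp
  -- right side: pull the filter and map through the key-tagging map
  rw [List.filter_map, List.map_map]
  simp only [Function.comp_def]
  -- commute the conjunction
  rw [List.filter_congr (p := fun r : Int × List (String × String) =>
        decide ((0 : Int) + (m : Int) < r.1) && (ruleKey r.2 == ruleKey rules[m]))
      (q := fun r : Int × List (String × String) =>
        (ruleKey r.2 == ruleKey rules[m]) && decide ((0 : Int) + (m : Int) < r.1))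
      (fun x _ => Bool.and_comm _ _)]
  rw [← List.filter_filter (p := fun r : Int × List (String × String) =>
        ruleKey r.2 == ruleKey rules[m])
      (q := fun r : Int × List (String × String) => decide ((0 : Int) + (m : Int) < r.1))]
  -- the strictly-greater filter is the drop-suffix enumeration
  have hdrop : (PySem.List.enumerate rules 0).filter
        (fun r : Int × List (String × String) => decide ((0 : Int) + (m : Int) < r.1))
      = PySem.List.enumerate (rules.drop (m + 1)) ((0 : Int) + ((m + 1 : Nat) : Int)) := by
    rw [← filter_enum_eq_enum_drop]
    apply List.filter_congr
    intro x _
    simp only [decide_eq_decide]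
    push_cast
    omega
  rw [hdrop]
  -- left side: the slice is the same drop-suffix enumeration
  rw [PySem.List.slice_from rules (by positivity : (0 : Int) ≤ 0 + (m : Int) + 1)]
  have htn : ((0 : Int) + (m : Int) + 1).toNat = m + 1 := by omega
  rw [htn]
  have hstart : (0 : Int) + (m : Int) + 1 = (0 : Int) + ((m + 1 : Nat) : Int) := by push_cast; ring
  rw [hstart]
  -- elementwise, A's comparison is B's key equality (symmetrized)
  rw [List.filter_congr (p := fun q : Int × List (String × String) => condA rules[m] q.2)
      (q := fun q : Int × List (String × String) => ruleKey q.2 == ruleKey rules[m])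
      (fun x _ => by
        show condA rules[m] x.2 = (ruleKey x.2 == ruleKey rules[m])
        rw [condA_eq, Bool.eq_iff_iff]
        simp only [beq_iff_eq]
        exact eq_comm)]

-- grouping: what B's setdefault/append dict holds at each key
lemma getD_foldl_modify_append_swap {κ β : Type} [BEq κ] [LawfulBEq κ]
    (l : List (β × κ)) (d : PySem.Dict κ (List β)) (c : κ) :
    (l.foldl (fun d p => d.modify p.2 [] (fun ls => ls ++ [p.1])) d).getD c []
      = d.getD c [] ++ (l.filter (fun p => p.2 == c)).map (fun p => p.1) := by
  have h := PySem.Dict.getD_foldl_modify_append (l.map (fun p => (p.2, p.1))) d c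
  rw [List.foldl_map, List.filter_map, List.map_map] at h
  simpa using h

lemma B_eq_canon (rules : List (List (String × String))) :
    find_duplicate_rules_alt rules = canon (rules.map ruleKey) := by
  unfold find_duplicate_rules_alt canon
  rw [PySem.List.foldl_append_eq_flatMap, List.nil_append]
  apply List.flatMap_congr
  intro p _
  rw [getD_foldl_modify_append_swap, PySem.Dict.getD_empty, List.nil_append,
      List.filter_map, List.map_map, List.filter_filter]
  rfl

-- ===== VERDICT (by name: the statement is the Claim_ definition above) =====
theorem find_duplicate_rules_spec : Claim_equal_find_duplicate_rules := by
  intro rules _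
  unfold Spec_find_duplicate_rules
  rw [A_eq_canon, B_eq_canon]
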